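-- pv_equiv track=rewrite | github.com/sskhi1/MACS | Cryptography/assignment3/project_3_1/dlog.py | build_left_table
-- ===== SOURCE A (Python) =====
-- def mod_inv(a, m):
--     return pow(a, -1, m)
--
-- def build_left_table(b, g, h, p):
--     left_table, left_val = {}, h
--     left_table[h] = 0
--     g_inverse = mod_inv(g, p)
--     for x1 in range(1, b):
--         left_val = (left_val * g_inverse) % p
--         left_table[left_val] = x1
--     return left_table
-- ===== SOURCE B (Python) =====
-- def mod_inv(a, m):
--     return pow(a, -1, m)
--
-- def build_left_table(b, g, h, p):
--     g_inverse = mod_inv(g, p)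
--     keys = [h] + [h * pow(g_inverse, x, p) % p for x in range(1, b)]
--     return dict(zip(keys, range(len(keys))))
-- ===== Notes on version B (the rewrite author's own statement) =====
-- stated objective: alternative
-- what changed: B is staged: it first materialises the whole key list (each key computed independently by modular exponentiation, no running accumulator) and then builds the dict at once with dict(zip(keys, range(len(keys)))), instead of A's single loop that threads a running product and mutates the dict in place.
import Mathlib
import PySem

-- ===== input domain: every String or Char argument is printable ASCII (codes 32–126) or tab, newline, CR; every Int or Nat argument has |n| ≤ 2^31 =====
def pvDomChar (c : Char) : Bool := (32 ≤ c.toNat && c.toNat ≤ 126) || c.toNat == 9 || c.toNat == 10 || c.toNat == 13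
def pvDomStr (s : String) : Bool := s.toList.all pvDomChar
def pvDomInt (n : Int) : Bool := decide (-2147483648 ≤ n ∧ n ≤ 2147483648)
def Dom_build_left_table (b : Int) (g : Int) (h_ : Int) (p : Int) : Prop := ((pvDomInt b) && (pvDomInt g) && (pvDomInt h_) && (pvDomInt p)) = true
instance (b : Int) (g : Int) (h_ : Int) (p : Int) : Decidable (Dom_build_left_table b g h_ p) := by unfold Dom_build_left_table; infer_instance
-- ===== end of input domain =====

-- B stages the work: first materialise the key list (each key by an independent modular exponentiation),
-- then build the dict at once from zipped (key, index) pairs — no running accumulator, no in-place mutation loop (alternative decomposition).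

-- ===== PORT A =====
-- loop body of A's for-loop: thread (dict, running value) and mutate the dict in place
def pvStepA (gi p : Int) (st : PySem.Dict Int Int × Int) (x1 : Int) : PySem.Dict Int Int × Int :=
  let left_val := PySem.Int.mod (st.2 * gi) p
  (st.1.insert left_val x1, left_val)

-- mod_inv(a, m) = pow(a, -1, m): exact on m ≠ 0 ∧ gcd(a,m) = 1 (elsewhere Python raises ValueError, excluded by Pre_).
def pv_mod_inv (a m : Int) : Int := (Int.gcdA a m).fmod m

def build_left_table (b : Int) (g : Int) (h_ : Int) (p : Int) : List (Int × Int) :=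
  let init : PySem.Dict Int Int × Int := ((PySem.Dict.empty).insert h_ 0, h_)
  let g_inverse := pv_mod_inv g p
  let st := (PySem.List.pyRange 1 b 1).foldl (pvStepA g_inverse p) init
  st.1.items

-- ===== PORT B =====
def build_left_table_alt (b : Int) (g : Int) (h_ : Int) (p : Int) : List (Int × Int) :=
  let g_inverse := pv_mod_inv g p
  let keys : List Int :=
    h_ :: (PySem.List.pyRange 1 b 1).map
      (fun x => PySem.Int.mod (h_ * PySem.Int.powMod g_inverse x.toNat p) p)
  ((keys.zip (PySem.List.pyRange 0 (keys.length : Int) 1)).foldl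
      (fun d kv => d.insert kv.1 kv.2) PySem.Dict.empty).items

-- ===== PRECONDITION & SPEC =====
-- Pre_ excludes exactly the inputs where Python's pow(g, -1, p) raises ValueError (p = 0 or gcd(g,p) ≠ 1); both A and B raise there.
def Pre_build_left_table (b : Int) (g : Int) (h_ : Int) (p : Int) : Prop := p ≠ 0 ∧ Int.gcd g p = 1
instance (b : Int) (g : Int) (h_ : Int) (p : Int) : Decidable (Pre_build_left_table b g h_ p) := by unfold Pre_build_left_table; infer_instance
def pvWitness_build_left_table : Int × Int × Int × Int := (5, 3, 2, 7)

def Spec_build_left_table (b : Int) (g : Int) (h_ : Int) (p : Int) (out : List (Int × Int)) : Prop := out = build_left_table_alt b g h_ p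
instance (b : Int) (g : Int) (h_ : Int) (p : Int) (out : List (Int × Int)) : Decidable (Spec_build_left_table b g h_ p out) := by unfold Spec_build_left_table; infer_instance

-- ===== CLAIM =====
def Claim_equal_build_left_table : Prop := ∀ (b : Int) (g : Int) (h_ : Int) (p : Int), Dom_build_left_table b g h_ p → Pre_build_left_table b g h_ p → Spec_build_left_table b g h_ p (build_left_table b g h_ p)

-- ===== LEMMAS AND PROOFS =====
theorem fmod_mul_left (a b p : Int) : ((a.fmod p) * b).fmod p = (a * b).fmod p := by
  rw [Int.mul_fmod, Int.fmod_fmod_of_dvd _ dvd_rfl, ← Int.mul_fmod]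

theorem fmod_mul_right (a b p : Int) : (a * (b.fmod p)).fmod p = (a * b).fmod p := by
  rw [Int.mul_fmod, Int.fmod_fmod_of_dvd _ dvd_rfl, ← Int.mul_fmod]

-- folding insert over a mapped range zipped with the range itself is folding keyed inserts over the range
theorem zip_fold (f : Int → Int) (n : Nat) :
    ∀ (a : Int) (d : PySem.Dict Int Int),
    (((PySem.List.pyRange a (a + (n : Int)) 1).map f).zip
        (PySem.List.pyRange a (a + (n : Int)) 1)).foldl
        (fun d kv => d.insert kv.1 kv.2) d
      = (PySem.List.pyRange a (a + (n : Int)) 1).foldl (fun d x => d.insert (f x) x) d := by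
  induction n with
  | zero => intro a d; simp
  | succ n ih =>
    intro a d
    have hab : a < a + ((n : Nat) + 1 : Nat) := by push_cast; omega
    rw [PySem.List.pyRange_one_cons hab]
    simp only [List.map_cons, List.zip_cons_cons, List.foldl_cons]
    have h1 : a + ((n : Nat) + 1 : Nat) = (a + 1) + (n : Int) := by push_cast; ring
    rw [h1, ih (a + 1) (d.insert (f a) a)]

-- A's fold equals B's keyed-insert fold on the same range, with the running value characterised
theorem loop_eq (gi h_ p : Int) (n : Nat) (d : PySem.Dict Int Int) :
    (PySem.List.pyRange 1 (1 + (n : Int)) 1).foldl (pvStepA gi p) (d, h_)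
      = ((PySem.List.pyRange 1 (1 + (n : Int)) 1).foldl
           (fun d x => d.insert (PySem.Int.mod (h_ * PySem.Int.powMod gi x.toNat p) p) x) d,
         if n = 0 then h_ else (h_ * gi ^ n).fmod p) := by
  induction n generalizing d with
  | zero => simp
  | succ n ih =>
    have h1 : (1 : Int) ≤ 1 + (n : Int) := by omega
    have hr : PySem.List.pyRange 1 (1 + ((n : Nat) + 1 : Nat) : Int) 1
        = PySem.List.pyRange 1 (1 + (n : Int)) 1 ++ [1 + (n : Int)] := by
      have : (1 + ((n : Nat) + 1 : Nat) : Int) = (1 + (n : Int)) + 1 := by push_cast; ring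
      rw [this, PySem.List.pyRange_one_succ_right h1]
    rw [hr, List.foldl_append, List.foldl_append, ih]
    simp only [List.foldl_cons, List.foldl_nil, pvStepA]
    have htn : (1 + (n : Int)).toNat = n + 1 := by omega
    have hkeyB : (h_ * PySem.Int.powMod gi (1 + (n : Int)).toNat p).fmod p
        = (h_ * gi ^ (n + 1)).fmod p := by
      rw [htn]
      simp only [PySem.Int.powMod, PySem.Int.mod]
      exact fmod_mul_right _ _ _
    cases n with
    | zero =>
      simp only [PySem.Int.mod] at *
      rw [hkeyB]
      simp [pow_one]
    | succ m =>
      have hne : (m + 1 : Nat) ≠ 0 := by omega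
      simp only [if_neg hne, PySem.Int.mod]
      rw [hkeyB]
      have : ((h_ * gi ^ (m + 1)).fmod p * gi).fmod p = (h_ * gi ^ (m + 1 + 1)).fmod p := by
        rw [fmod_mul_left]; ring_nf
      rw [this]
      simp

-- ===== VERDICT =====
theorem build_left_table_spec : Claim_equal_build_left_table := by
  intro b g h_ p _ _
  unfold Spec_build_left_table build_left_table build_left_table_alt
  dsimp only
  by_cases hb : b ≤ 1
  · rw [PySem.List.pyRange_one_eq_nil hb]
    norm_num [PySem.List.pyRange_zero_nat]
    simp [PySem.List.pyRange_one, List.range_succ]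
  · set m := (b - 1).toNat with hm
    have hn : b = 1 + (m : Int) := by omega
    have hlen : ((h_ :: (PySem.List.pyRange 1 b 1).map
        (fun x => PySem.Int.mod (h_ * PySem.Int.powMod (pv_mod_inv g p) x.toNat p) p)).length : Int)
        = 1 + (m : Int) := by
      simp [PySem.List.length_pyRange_one]; omega
    rw [hlen]
    have h0 : (0 : Int) < 1 + (m : Int) := by omega
    rw [PySem.List.pyRange_one_cons h0]
    simp only [List.zip_cons_cons, List.foldl_cons]
    have h01 : (0 : Int) + 1 = 1 := rfl
    rw [h01, hn, loop_eq (pv_mod_inv g p) h_ p m ((PySem.Dict.empty).insert h_ 0),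
      zip_fold _ m 1 ((PySem.Dict.empty).insert h_ 0)]
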